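-- pv_equiv track=rewrite | github.com/erickrodrigs/MAC0327 | lista1/B.py | calculateMaxDistance
-- ===== SOURCE A (Python) =====
-- def calculateMaxDistance(n, h, flows):
--     maxDistance = flows[0][1] - flows[0][0]
--     answer = maxDistance
--     requiredHeight = 0
--     last = 0
--
--     for i in range(1, n):
--         requiredHeight += flows[i][0] - flows[i - 1][1]
--
--         while requiredHeight >= h:
--             requiredHeight -= flows[last + 1][0] - flows[last][1]
--             maxDistance -= flows[last][1] - flows[last][0]
--             last += 1
--
--         maxDistance += flows[i][1] - flows[i][0]
--         if maxDistance > answer: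
--             answer = maxDistance
--
--     return answer + h
-- ===== SOURCE B (Python) =====
-- def calculateMaxDistance(n, h, flows):
--     # prefix tables: G[i] = total gap before interval i, W[i] = total width through interval i
--     G = [0]
--     W = [flows[0][1] - flows[0][0]]
--     for i in range(1, n):
--         G.append(G[-1] + flows[i][0] - flows[i - 1][1])
--         W.append(W[-1] + flows[i][1] - flows[i][0])
--     best = W[0]
--     last = 0
--     for i in range(1, len(W)):
--         while G[i] - G[last] >= h:
--             last += 1
--         width = W[i] - (W[last - 1] if last > 0 else 0)
--         best = max(best, width)
--     return best + h
-- ===== Notes on version B (the rewrite author's own statement) =====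
-- stated objective: alternative
-- what changed: B precomputes prefix-sum tables G (gaps) and W (widths) in a first pass, then the window loop tests G[i]-G[last] >= h and reads the window width as a table difference W[i]-W[last-1], eliminating A's running requiredHeight/maxDistance accumulators and its flows[last+1]/flows[last] re-reads in the shrink loop (binary search is unsound since gaps may be negative, so the pointer still advances linearly).
-- outside the precondition, e.g. on calculateMaxDistance(2, -1, [(2, 5), (5, 2), (5, 1), (-1, 1), (1, 1)]): A returns 2, B raises IndexError; on calculateMaxDistance(2, -5, [(0, 10), (2, 5)]): A returns 8, B returns 8
import Mathlib
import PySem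

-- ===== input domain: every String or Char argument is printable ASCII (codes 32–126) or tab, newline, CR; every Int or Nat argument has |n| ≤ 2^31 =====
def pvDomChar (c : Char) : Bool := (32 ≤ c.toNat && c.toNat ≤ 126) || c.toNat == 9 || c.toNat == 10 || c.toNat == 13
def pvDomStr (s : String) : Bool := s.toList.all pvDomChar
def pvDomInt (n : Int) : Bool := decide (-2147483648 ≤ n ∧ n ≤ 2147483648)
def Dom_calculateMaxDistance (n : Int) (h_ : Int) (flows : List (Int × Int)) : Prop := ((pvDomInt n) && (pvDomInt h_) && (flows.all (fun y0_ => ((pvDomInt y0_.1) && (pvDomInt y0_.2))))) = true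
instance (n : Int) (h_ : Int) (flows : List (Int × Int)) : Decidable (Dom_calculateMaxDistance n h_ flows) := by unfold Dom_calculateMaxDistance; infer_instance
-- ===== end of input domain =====

-- B replaces A's running requiredHeight/maxDistance accumulators by precomputed prefix-sum
-- tables of gaps and widths (objective: alternative decomposition, same O(n) cost).

-- ===== PORT A =====
-- A's inner 'while requiredHeight >= h' loop; the out-of-range branch is Python's IndexError
-- at flows[last + 1] (unreachable under Pre_; the bound check only makes the recursion total).
def pvAWhile (flows : List (Int × Int)) (h_ : Int) (rH maxD : Int) (last : Nat) :
    Int × Int × Nat :=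
  if rH ≥ h_ then
    if hlt : last + 1 < flows.length then
      pvAWhile flows h_ (rH - ((flows.getD (last + 1) (0, 0)).1 - (flows.getD last (0, 0)).2))
        (maxD - ((flows.getD last (0, 0)).2 - (flows.getD last (0, 0)).1)) (last + 1)
    else (rH, maxD, last)
  else (rH, maxD, last)
termination_by flows.length - last

-- one iteration of A's 'for i in range(1, n)' body; state (requiredHeight, maxDistance, answer, last)
def pvAStep (flows : List (Int × Int)) (h_ : Int) (s : Int × Int × Int × Nat) (i : Int) :
    Int × Int × Int × Nat :=
  let fi := PySem.List.pyGetD flows i ((0 : Int), (0 : Int))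
  let fim := PySem.List.pyGetD flows (i - 1) ((0 : Int), (0 : Int))
  let rH := s.1 + (fi.1 - fim.2)
  let w := pvAWhile flows h_ rH s.2.1 s.2.2.2
  let maxD := w.2.1 + (fi.2 - fi.1)
  (w.1, maxD, if maxD > s.2.2.1 then maxD else s.2.2.1, w.2.2)

def calculateMaxDistance (n : Int) (h_ : Int) (flows : List (Int × Int)) : Int :=
  let f0 := PySem.List.pyGetD flows 0 ((0 : Int), (0 : Int))   -- flows[0]; [] excluded by Pre_
  let st := (PySem.List.pyRange 1 n 1).foldl (pvAStep flows h_)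
    (0, f0.2 - f0.1, f0.2 - f0.1, 0)
  st.2.2.1 + h_

-- ===== PORT B =====
-- B's inner 'while G[i] - G[last] >= h' loop; the out-of-range branch is Python's IndexError
-- at G[last] (unreachable under Pre_; the bound check only makes the recursion total).
def pvBWhile (G : List Int) (h_ gi : Int) (last : Nat) : Nat :=
  if hlt : last < G.length then
    if gi - G.getD last 0 ≥ h_ then pvBWhile G h_ gi (last + 1) else last
  else last
termination_by G.length - last

-- one iteration of B's table-building loop: append to the prefix tables G and W
def pvB1Step (flows : List (Int × Int)) (gw : List Int × List Int) (i : Int) :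
    List Int × List Int :=
  let fi := PySem.List.pyGetD flows i ((0 : Int), (0 : Int))
  let fim := PySem.List.pyGetD flows (i - 1) ((0 : Int), (0 : Int))
  (gw.1 ++ [PySem.List.pyGetD gw.1 (-1) 0 + (fi.1 - fim.2)],
   gw.2 ++ [PySem.List.pyGetD gw.2 (-1) 0 + (fi.2 - fi.1)])

-- one iteration of B's window loop over the tables; state (best, last)
def pvB2Step (G W : List Int) (h_ : Int) (s : Int × Nat) (i : Int) : Int × Nat :=
  let last := pvBWhile G h_ (PySem.List.pyGetD G i 0) s.2
  let width := PySem.List.pyGetD W i 0 -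
    (if last > 0 then PySem.List.pyGetD W ((last : Int) - 1) 0 else 0)
  (max s.1 width, last)

def calculateMaxDistance_alt (n : Int) (h_ : Int) (flows : List (Int × Int)) : Int :=
  let f0 := PySem.List.pyGetD flows 0 ((0 : Int), (0 : Int))   -- flows[0]
  let GW := (PySem.List.pyRange 1 n 1).foldl (pvB1Step flows) ([0], [f0.2 - f0.1])
  let res := (PySem.List.pyRange 1 (GW.2.length : Int) 1).foldl (pvB2Step GW.1 GW.2 h_)
    (f0.2 - f0.1, 0)
  res.1 + h_

-- ===== PRECONDITION & SPEC =====
-- Pre_ requires a nonempty list with n ≤ len(flows) (A indexes flows[0..n-1] and raises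
-- IndexError otherwise) and 1 ≤ h_: for h_ ≤ 0 the shrink loop's guard 'requiredHeight >= h'
-- typically never fails and A overruns the list with IndexError; whether it happens to
-- terminate first depends on the interval data, not on any closed-form shape of the input,
-- so all h_ ≤ 0 inputs are excluded (on the cited one A still returns, and B agrees there).
def Pre_calculateMaxDistance (n : Int) (h_ : Int) (flows : List (Int × Int)) : Prop :=
  flows ≠ [] ∧ n ≤ flows.length ∧ 1 ≤ h_
instance (n : Int) (h_ : Int) (flows : List (Int × Int)) :
    Decidable (Pre_calculateMaxDistance n h_ flows) := by
  unfold Pre_calculateMaxDistance; infer_instance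

def pvWitness_calculateMaxDistance : Int × Int × (List (Int × Int)) :=
  (3, 2, [(0, 1), (4, 6), (7, 9)])

def Spec_calculateMaxDistance (n : Int) (h_ : Int) (flows : List (Int × Int)) (out : Int) : Prop :=
  out = calculateMaxDistance_alt n h_ flows
instance (n : Int) (h_ : Int) (flows : List (Int × Int)) (out : Int) :
    Decidable (Spec_calculateMaxDistance n h_ flows out) := by
  unfold Spec_calculateMaxDistance; infer_instance

-- ===== CLAIM (what is proved, stated in full; the proofs are below) =====
def Claim_equal_calculateMaxDistance : Prop :=
  ∀ (n : Int) (h_ : Int) (flows : List (Int × Int)), Dom_calculateMaxDistance n h_ flows →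
    Pre_calculateMaxDistance n h_ flows →
    Spec_calculateMaxDistance n h_ flows (calculateMaxDistance n h_ flows)

-- ===== LEMMAS AND PROOFS =====

-- prefix sums of gaps and of widths, as functions of the interval index
def gSeq (flows : List (Int × Int)) : Nat → Int
  | 0 => 0
  | i + 1 => gSeq flows i + ((flows.getD (i + 1) (0, 0)).1 - (flows.getD i (0, 0)).2)

def wSeq (flows : List (Int × Int)) : Nat → Int
  | 0 => (flows.getD 0 (0, 0)).2 - (flows.getD 0 (0, 0)).1
  | i + 1 => wSeq flows i + ((flows.getD (i + 1) (0, 0)).2 - (flows.getD (i + 1) (0, 0)).1)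

-- sum of the widths of intervals 0..j-1 (exclusive prefix)
def wPre (flows : List (Int × Int)) : Nat → Int
  | 0 => 0
  | j + 1 => wSeq flows j

theorem wPre_succ_sub (flows : List (Int × Int)) (j : Nat) :
    wPre flows (j + 1) - wPre flows j =
      (flows.getD j (0, 0)).2 - (flows.getD j (0, 0)).1 := by
  cases j with
  | zero => simp [wPre, wSeq]
  | succ i => simp [wPre, wSeq]

theorem pyGetD_one_add {α : Type} (xs : List α) (k : Nat) (d : α) :
    PySem.List.pyGetD xs (1 + (k : Int)) d = xs.getD (k + 1) d := by
  have h : (1 + (k : Int)) = ((k + 1 : Nat) : Int) := by omega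
  rw [h, PySem.List.pyGetD_natCast]

theorem pyGetD_one_add_sub {α : Type} (xs : List α) (k : Nat) (d : α) :
    PySem.List.pyGetD xs (1 + (k : Int) - 1) d = xs.getD k d := by
  have h : (1 + (k : Int) - 1) = ((k : Nat) : Int) := by omega
  rw [h, PySem.List.pyGetD_natCast]

theorem getD_map_range (f : Nat → Int) (N j : Nat) (hj : j < N) :
    ((List.range N).map f).getD j 0 = f j := by
  simp [List.getD_eq_getElem?_getD, hj]

-- bounds for B's pointer advance on the gap table
theorem bw_bounds (flows : List (Int × Int)) (h_ : Int) (hh : 1 ≤ h_) (N : Nat) :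
    ∀ d i last, last ≤ i → i - last ≤ d → i < N →
      last ≤ pvBWhile ((List.range N).map (gSeq flows)) h_ (gSeq flows i) last ∧
      pvBWhile ((List.range N).map (gSeq flows)) h_ (gSeq flows i) last ≤ i := by
  intro d
  induction d with
  | zero =>
    intro i last h1 h2 h3
    have he : last = i := by omega
    subst he
    rw [pvBWhile, dif_pos (by simpa using h3), getD_map_range _ _ _ h3,
      if_neg (by omega : ¬ gSeq flows last - gSeq flows last ≥ h_)]
    exact ⟨le_refl _, le_refl _⟩
  | succ d ih =>
    intro i last h1 h2 h3
    rw [pvBWhile, dif_pos (by simp; omega), getD_map_range _ _ _ (by omega)]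
    by_cases hc : gSeq flows i - gSeq flows last ≥ h_
    · rw [if_pos hc]
      have hlast : last < i := by
        rcases Nat.lt_or_ge last i with h | h
        · exact h
        · have : last = i := by omega
          subst this; omega
      have hr := ih i (last + 1) (by omega) (by omega) h3
      exact ⟨by omega, hr.2⟩
    · rw [if_neg hc]; exact ⟨le_refl _, h1⟩

-- A's shrink loop equals B's pointer advance, with closed-form components
theorem while_eq (flows : List (Int × Int)) (h_ : Int) (hh : 1 ≤ h_) (N : Nat)
    (hNL : N ≤ flows.length) :
    ∀ d i last maxD, last ≤ i → i - last ≤ d → i < N →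
      pvAWhile flows h_ (gSeq flows i - gSeq flows last) maxD last =
        (gSeq flows i -
           gSeq flows (pvBWhile ((List.range N).map (gSeq flows)) h_ (gSeq flows i) last),
         maxD - (wPre flows (pvBWhile ((List.range N).map (gSeq flows)) h_ (gSeq flows i) last)
                  - wPre flows last),
         pvBWhile ((List.range N).map (gSeq flows)) h_ (gSeq flows i) last) := by
  intro d
  induction d with
  | zero =>
    intro i last maxD h1 h2 h3
    have he : last = i := by omega
    subst he
    have hB : pvBWhile ((List.range N).map (gSeq flows)) h_ (gSeq flows last) last = last := by
      rw [pvBWhile, dif_pos (by simpa using h3), getD_map_range _ _ _ h3,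
        if_neg (by omega : ¬ gSeq flows last - gSeq flows last ≥ h_)]
    rw [hB, pvAWhile, if_neg (by omega : ¬ gSeq flows last - gSeq flows last ≥ h_)]
    simp
  | succ d ih =>
    intro i last maxD h1 h2 h3
    by_cases hc : gSeq flows i - gSeq flows last ≥ h_
    · have hlast : last < i := by
        rcases Nat.lt_or_ge last i with h | h
        · exact h
        · have : last = i := by omega
          subst this; omega
      have hB : pvBWhile ((List.range N).map (gSeq flows)) h_ (gSeq flows i) last =
          pvBWhile ((List.range N).map (gSeq flows)) h_ (gSeq flows i) (last + 1) := by
        rw [pvBWhile, dif_pos (by simp; omega), getD_map_range _ _ _ (by omega), if_pos hc]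
      have hg : gSeq flows (last + 1) =
          gSeq flows last + ((flows.getD (last + 1) (0, 0)).1 - (flows.getD last (0, 0)).2) :=
        rfl
      have e1 : gSeq flows i - gSeq flows last -
          ((flows.getD (last + 1) (0, 0)).1 - (flows.getD last (0, 0)).2) =
          gSeq flows i - gSeq flows (last + 1) := by rw [hg]; ring
      have e2 : maxD - ((flows.getD last (0, 0)).2 - (flows.getD last (0, 0)).1) =
          maxD - (wPre flows (last + 1) - wPre flows last) := by
        rw [wPre_succ_sub]
      rw [hB, pvAWhile, if_pos hc, dif_pos (by omega : last + 1 < flows.length), e1, e2,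
        ih i (last + 1) _ (by omega) (by omega) h3]
      simp only [Prod.mk.injEq, true_and, and_true]
      ring
    · have hB : pvBWhile ((List.range N).map (gSeq flows)) h_ (gSeq flows i) last = last := by
        rw [pvBWhile, dif_pos (by simp; omega), getD_map_range _ _ _ (by omega), if_neg hc]
      rw [hB, pvAWhile, if_neg hc]
      simp

-- phase 1 of B builds exactly the prefix tables of gSeq and wSeq
theorem phase1 (flows : List (Int × Int)) : ∀ m : Nat,
    ((List.range m).map (fun k : Nat => (1 : Int) + (k : Int))).foldl (pvB1Step flows)
        ([0], [(flows.getD 0 (0, 0)).2 - (flows.getD 0 (0, 0)).1])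
      = ((List.range (m + 1)).map (gSeq flows), (List.range (m + 1)).map (wSeq flows)) := by
  intro m
  induction m with
  | zero => simp [gSeq, wSeq]
  | succ m ih =>
    rw [List.range_succ, List.map_append, List.foldl_append, ih]
    simp only [List.map_cons, List.map_nil, List.foldl_cons, List.foldl_nil]
    have hG : (List.range (m + 1)).map (gSeq flows) =
        (List.range m).map (gSeq flows) ++ [gSeq flows m] := by
      rw [List.range_succ, List.map_append]; rfl
    have hW : (List.range (m + 1)).map (wSeq flows) =
        (List.range m).map (wSeq flows) ++ [wSeq flows m] := by
      rw [List.range_succ, List.map_append]; rfl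
    have hG2 : (List.range (m + 1 + 1)).map (gSeq flows) =
        (List.range (m + 1)).map (gSeq flows) ++ [gSeq flows (m + 1)] := by
      rw [List.range_succ (n := m + 1), List.map_append]; rfl
    have hW2 : (List.range (m + 1 + 1)).map (wSeq flows) =
        (List.range (m + 1)).map (wSeq flows) ++ [wSeq flows (m + 1)] := by
      rw [List.range_succ (n := m + 1), List.map_append]; rfl
    simp only [pvB1Step, pyGetD_one_add, pyGetD_one_add_sub]
    rw [hG, hW, PySem.List.pyGetD_neg_one_append_singleton,
      PySem.List.pyGetD_neg_one_append_singleton, ← hG, ← hW, hG2, hW2]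
    rfl

theorem ite_gt_max (a x : Int) : (if x > a then x else a) = max a x := by
  by_cases h : x > a
  · rw [if_pos h, max_eq_right (le_of_lt h)]
  · rw [if_neg h, max_eq_left (not_lt.mp h)]

-- coupled invariant: after m iterations both folds carry the same answer and pointer,
-- and A's accumulators are the table differences
theorem outer (flows : List (Int × Int)) (h_ : Int) (hh : 1 ≤ h_) (N : Nat)
    (hNL : N ≤ flows.length) :
    ∀ m, m + 1 ≤ N →
      ∃ ans l, l ≤ m ∧
        ((List.range m).map (fun k : Nat => (1 : Int) + (k : Int))).foldl (pvAStep flows h_)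
            (0, wSeq flows 0, wSeq flows 0, 0)
          = (gSeq flows m - gSeq flows l, wSeq flows m - wPre flows l, ans, l) ∧
        ((List.range m).map (fun k : Nat => (1 : Int) + (k : Int))).foldl
            (pvB2Step ((List.range N).map (gSeq flows)) ((List.range N).map (wSeq flows)) h_)
            (wSeq flows 0, 0)
          = (ans, l) := by
  intro m
  induction m with
  | zero =>
    intro _
    exact ⟨wSeq flows 0, 0, le_refl 0, by simp [gSeq, wPre], by simp⟩
  | succ m ih =>
    intro hm1
    obtain ⟨ans, l, hl, hA, hBf⟩ := ih (by omega)
    have hm : m + 1 < N := by omega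
    have hbw := bw_bounds flows h_ hh N (m + 1) (m + 1) l (by omega) (by omega) hm
    have hg : gSeq flows (m + 1) =
        gSeq flows m + ((flows.getD (m + 1) (0, 0)).1 - (flows.getD m (0, 0)).2) := rfl
    have hw : wSeq flows (m + 1) =
        wSeq flows m + ((flows.getD (m + 1) (0, 0)).2 - (flows.getD (m + 1) (0, 0)).1) := rfl
    have hAstep : pvAStep flows h_
        (gSeq flows m - gSeq flows l, wSeq flows m - wPre flows l, ans, l) (1 + (m : Int))
        = (gSeq flows (m + 1) -
             gSeq flows (pvBWhile ((List.range N).map (gSeq flows)) h_ (gSeq flows (m + 1)) l),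
           wSeq flows (m + 1) -
             wPre flows (pvBWhile ((List.range N).map (gSeq flows)) h_ (gSeq flows (m + 1)) l),
           (if (wSeq flows (m + 1) -
                 wPre flows (pvBWhile ((List.range N).map (gSeq flows)) h_ (gSeq flows (m + 1)) l))
                > ans
            then wSeq flows (m + 1) -
                 wPre flows (pvBWhile ((List.range N).map (gSeq flows)) h_ (gSeq flows (m + 1)) l)
            else ans),
           pvBWhile ((List.range N).map (gSeq flows)) h_ (gSeq flows (m + 1)) l) := by
      simp only [pvAStep, pyGetD_one_add, pyGetD_one_add_sub]
      have e1 : gSeq flows m - gSeq flows l +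
          ((flows.getD (m + 1) (0, 0)).1 - (flows.getD m (0, 0)).2) =
          gSeq flows (m + 1) - gSeq flows l := by rw [hg]; ring
      rw [e1, while_eq flows h_ hh N hNL (m + 1) (m + 1) l _ (by omega) (by omega) hm]
      have e2 : wSeq flows m - wPre flows l -
          (wPre flows (pvBWhile ((List.range N).map (gSeq flows)) h_ (gSeq flows (m + 1)) l) -
            wPre flows l) +
          ((flows.getD (m + 1) (0, 0)).2 - (flows.getD (m + 1) (0, 0)).1) =
          wSeq flows (m + 1) -
            wPre flows (pvBWhile ((List.range N).map (gSeq flows)) h_ (gSeq flows (m + 1)) l) := by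
        rw [hw]; ring
      rw [e2]
    have hBstep : pvB2Step ((List.range N).map (gSeq flows)) ((List.range N).map (wSeq flows)) h_
        (ans, l) (1 + (m : Int))
        = (max ans (wSeq flows (m + 1) -
             wPre flows (pvBWhile ((List.range N).map (gSeq flows)) h_ (gSeq flows (m + 1)) l)),
           pvBWhile ((List.range N).map (gSeq flows)) h_ (gSeq flows (m + 1)) l) := by
      simp only [pvB2Step, pyGetD_one_add]
      rw [getD_map_range _ _ _ hm, getD_map_range _ _ _ hm]
      have hif : (if 0 < pvBWhile ((List.range N).map (gSeq flows)) h_ (gSeq flows (m + 1)) l then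
            PySem.List.pyGetD ((List.range N).map (wSeq flows))
              ((pvBWhile ((List.range N).map (gSeq flows)) h_ (gSeq flows (m + 1)) l : Int) - 1) 0
          else 0)
          = wPre flows (pvBWhile ((List.range N).map (gSeq flows)) h_ (gSeq flows (m + 1)) l) := by
        cases hB0 : pvBWhile ((List.range N).map (gSeq flows)) h_ (gSeq flows (m + 1)) l with
        | zero => simp [wPre]
        | succ j =>
          have hj : j < N := by
            have := hbw.2
            omega
          have hc : ((j + 1 : Nat) : Int) - 1 = ((j : Nat) : Int) := by omega
          rw [if_pos (by omega), hc, PySem.List.pyGetD_natCast, getD_map_range _ _ _ hj]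
          rfl
      rw [hif]
    refine ⟨max ans (wSeq flows (m + 1) -
        wPre flows (pvBWhile ((List.range N).map (gSeq flows)) h_ (gSeq flows (m + 1)) l)),
      pvBWhile ((List.range N).map (gSeq flows)) h_ (gSeq flows (m + 1)) l, hbw.2, ?_, ?_⟩
    · rw [List.range_succ, List.map_append, List.foldl_append, hA]
      simp only [List.map_cons, List.map_nil, List.foldl_cons, List.foldl_nil]
      rw [hAstep, ite_gt_max]
    · rw [List.range_succ, List.map_append, List.foldl_append, hBf]
      simp only [List.map_cons, List.map_nil, List.foldl_cons, List.foldl_nil]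
      rw [hBstep]

-- ===== VERDICT (by name: the statement is the Claim_ definition above) =====
theorem calculateMaxDistance_spec : Claim_equal_calculateMaxDistance := by
  intro n h_ flows _ hPre
  unfold Pre_calculateMaxDistance at hPre
  obtain ⟨hne, hnL, hh⟩ := hPre
  unfold Spec_calculateMaxDistance
  simp only [calculateMaxDistance, calculateMaxDistance_alt]
  by_cases hn : n ≤ 0
  · rw [PySem.List.pyRange_one_eq_nil (by omega : n ≤ 1)]
    simp
  · have hn1 : 1 ≤ n := by omega
    have hNn : ((n.toNat : Int)) = n := Int.toNat_of_nonneg (by omega)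
    have hNL : n.toNat ≤ flows.length := by omega
    have hN1 : 1 ≤ n.toNat := by omega
    rw [PySem.List.pyGetD_zero, PySem.List.pyRange_one,
      (by omega : (n - 1).toNat = n.toNat - 1), phase1 flows (n.toNat - 1),
      (by omega : n.toNat - 1 + 1 = n.toNat)]
    simp only [List.length_map, List.length_range]
    rw [hNn, PySem.List.pyRange_one, (by omega : (n - 1).toNat = n.toNat - 1)]
    obtain ⟨ans, l, hl, hA, hB⟩ := outer flows h_ hh n.toNat hNL (n.toNat - 1) (by omega)
    rw [show (flows.getD 0 ((0 : Int), (0 : Int))).2 - (flows.getD 0 ((0 : Int), (0 : Int))).1 =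
      wSeq flows 0 from rfl]
    rw [hA, hB]
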